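-- pv_equiv track=rewrite | github.com/ankitects/anki | pylib/anki/utils.py | _incGuid
-- ===== SOURCE A (Python) =====
-- import string
--
-- _base91_extra_chars = "!#$%&()*+,-./:;<=>?@[]^_`{|}~"
--
-- def _incGuid(guid) -> str:
--     s = string
--     table = s.ascii_letters + s.digits + _base91_extra_chars
--     idx = table.index(guid[0])
--     if idx + 1 == len(table):
--         # overflow
--         guid = table[0] + _incGuid(guid[1:])
--     else:
--         guid = table[idx + 1] + guid[1:]
--     return guid
-- ===== SOURCE B (Python) =====
-- import string
--
-- _base91_extra_chars = "!#$%&()*+,-./:;<=>?@[]^_`{|}~"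
--
--
-- def _incGuid(guid) -> str:
--     table = string.ascii_letters + string.digits + _base91_extra_chars
--     # Count the run of leading max-table chars (the carry run), then bump the
--     # next char and reset the run to the table's first char, keeping the tail.
--     k = 0
--     while guid[k] == table[-1]:
--         k += 1
--     return table[0] * k + table[table.index(guid[k]) + 1] + guid[k + 1:]
-- ===== Notes on version B (the rewrite author's own statement) =====
-- stated objective: alternative
-- what changed: Replaces the recursion that rebuilds the string one char per call by a counting pass: count the leading run of the table's last char, then emit table[0]*k + bumped char + untouched tail in one concatenation.
import Mathlib
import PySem

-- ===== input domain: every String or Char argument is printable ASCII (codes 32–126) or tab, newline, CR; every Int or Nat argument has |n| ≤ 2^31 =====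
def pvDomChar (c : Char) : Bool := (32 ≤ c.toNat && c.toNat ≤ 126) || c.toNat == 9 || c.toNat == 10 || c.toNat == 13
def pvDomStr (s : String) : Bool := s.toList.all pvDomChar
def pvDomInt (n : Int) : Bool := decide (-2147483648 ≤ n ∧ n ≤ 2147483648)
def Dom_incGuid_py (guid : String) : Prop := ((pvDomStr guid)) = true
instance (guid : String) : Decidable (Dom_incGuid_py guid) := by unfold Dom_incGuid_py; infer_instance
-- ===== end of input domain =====

-- B replaces A's recursion (one call per carry char, rebuilding the string on unwind)
-- by a counting pass: count the leading run of '~' (the table's last char), then emit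
-- table[0]*k + bumped char + untouched tail (objective: alternative).
-- Both A and B raise IndexError/ValueError outside Pre_ below; the proof is about returns.

-- ===== PORT A =====
-- table = string.ascii_letters + string.digits + _base91_extra_chars, as a char list
def pvTable : List Char :=
  ['a', 'b', 'c', 'd', 'e', 'f', 'g', 'h', 'i', 'j', 'k', 'l', 'm', 'n', 'o', 'p', 'q', 'r', 's', 't', 'u', 'v', 'w', 'x', 'y', 'z', 'A', 'B', 'C', 'D', 'E', 'F', 'G', 'H', 'I', 'J', 'K', 'L', 'M', 'N', 'O', 'P', 'Q', 'R', 'S', 'T', 'U', 'V', 'W', 'X', 'Y', 'Z', '0', '1', '2', '3', '4', '5', '6', '7', '8', '9', '!', '#', '$', '%', '&', '(', ')', '*', '+', ',', '-', '.', '/', ':', ';', '<', '=', '>', '?', '@', '[', ']', '^', '_', '`', '{', '|', '}', '~']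

-- A's recursion; none = exception (IndexError on guid[0] of "", ValueError from table.index)
def incGuidA : List Char → Option (List Char)
  | [] => none                               -- guid[0] raises IndexError
  | c :: rest =>
    match PySem.List.index? pvTable c with   -- table.index(guid[0]); ValueError = none
    | none => none
    | some idx =>
      if idx + 1 = pvTable.length then       -- overflow
        match incGuidA rest with             -- table[0] + _incGuid(guid[1:])
        | none => none
        | some g =>
          match PySem.List.pyGet? pvTable 0 with
          | none => none
          | some c0 => some (c0 :: g)
      else                                   -- table[idx + 1] + guid[1:]
        match PySem.List.pyGet? pvTable ((idx : Int) + 1) with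
        | none => none
        | some c' => some (c' :: rest)

def incGuid_py (guid : String) : String :=
  ((incGuidA guid.toList).map String.ofList).getD ""

-- ===== PORT B =====
-- k = length of the leading run of table[-1] = '~'; then one concatenation.
-- none = exception (IndexError on guid[k] past the end, ValueError from table.index)
def incGuidB (cs : List Char) : Option (List Char) :=
  let k := (cs.takeWhile (fun c => c == '~')).length         -- while guid[k] == table[-1]: k += 1
  (PySem.List.pyGet? cs (k : Int)).bind fun c =>             -- guid[k]
    (PySem.List.index? pvTable c).bind fun idx =>            -- table.index(guid[k])
      (PySem.List.pyGet? pvTable ((idx : Int) + 1)).map fun c' =>  -- table[idx + 1]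
        List.replicate k 'a' ++ c' :: cs.drop (k + 1)        -- table[0]*k + table[idx+1] + guid[k+1:]

def incGuid_py_alt (guid : String) : String :=
  ((incGuidB guid.toList).map String.ofList).getD ""

-- ===== PRECONDITION & SPEC =====
-- A raises (IndexError/ValueError) exactly when the run of leading carry characters
-- (copies of the table's last character '~') covers the whole string or is followed by a
-- character outside the base91 table; Pre_ excludes exactly those inputs.
def Pre_incGuid_py (guid : String) : Prop :=
  (match guid.toList.dropWhile (fun c => c == '~') with
   | [] => false
   | c :: _ => pvTable.contains c) = true
instance (guid : String) : Decidable (Pre_incGuid_py guid) := by unfold Pre_incGuid_py; infer_instance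

def pvWitness_incGuid_py : String := "az9~"

def Spec_incGuid_py (guid : String) (out : String) : Prop := out = incGuid_py_alt guid
instance (guid : String) (out : String) : Decidable (Spec_incGuid_py guid out) := by unfold Spec_incGuid_py; infer_instance

-- ===== CLAIM (what is proved, stated in full; the proofs are below) =====
def Claim_equal_incGuid_py : Prop := ∀ (guid : String), Dom_incGuid_py guid → Pre_incGuid_py guid → Spec_incGuid_py guid (incGuid_py guid)

-- ===== LEMMAS AND PROOFS =====

-- B on a leading carry char prepends 'a' to B of the rest
theorem incGuidB_carry (rest : List Char) :
    incGuidB ('~' :: rest) = (incGuidB rest).map (fun g => 'a' :: g) := by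
  unfold incGuidB
  have h1 : ('~' :: rest).takeWhile (fun c => c == '~')
      = '~' :: rest.takeWhile (fun c => c == '~') := by simp
  rw [h1]
  simp only [List.length_cons]
  have h2 : PySem.List.pyGet? ('~' :: rest)
      (((rest.takeWhile (fun c => c == '~')).length + 1 : ℕ) : Int)
      = PySem.List.pyGet? rest (((rest.takeWhile (fun c => c == '~')).length : ℕ) : Int) := by
    simp [PySem.List.pyGet?_natCast]
  rw [h2]
  cases h : PySem.List.pyGet? rest (((rest.takeWhile (fun c => c == '~')).length : ℕ) : Int) with
  | none => simp
  | some c =>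
    cases hi : PySem.List.index? pvTable c with
    | none => rw [PySem.List.index?_eq_idxOf?] at hi; simp [hi]
    | some idx =>
      rw [PySem.List.index?_eq_idxOf?] at hi
      cases hg : PySem.List.pyGet? pvTable ((idx : Int) + 1) with
      | none => simp [hi, hg]
      | some c' => simp [hi, hg, List.replicate_succ, List.drop_succ_cons]

-- per-character facts over the 91 table chars, checked by evaluation
set_option maxRecDepth 20000 in
theorem pvTable_facts_bool : (pvTable.all (fun c =>
    (decide (PySem.List.index? pvTable c = some 90) == decide (c = '~')))) = true := by decide

theorem pvTable_last_iff : ∀ c ∈ pvTable,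
    PySem.List.index? pvTable c = some 90 ↔ c = '~' := by
  intro c hc
  have h := List.all_eq_true.mp pvTable_facts_bool c hc
  simpa [decide_eq_decide] using h

set_option maxRecDepth 40000 in
theorem pvIncA_eq_incB : ∀ cs : List Char,
    (match cs.dropWhile (fun c => c == '~') with
     | [] => false
     | c :: _ => pvTable.contains c) = true →
    incGuidA cs = incGuidB cs := by
  intro cs
  induction cs with
  | nil => intro h; simp at h
  | cons c rest ih =>
    intro hP
    by_cases hne : c = '~'
    · -- carry case: A recurses; B counts one more leading '~'
      subst hne
      have hrest : incGuidA rest = incGuidB rest := by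
        apply ih
        simpa [List.dropWhile_cons] using hP
      rw [incGuidB_carry]
      show incGuidA ('~' :: rest) = _
      unfold incGuidA
      rw [show PySem.List.index? pvTable '~' = some 90 from by decide]
      simp only [hrest]
      rw [if_pos (show (90 : ℕ) + 1 = pvTable.length from by decide)]
      rw [show PySem.List.pyGet? pvTable 0 = some 'a' from by decide]
      cases incGuidB rest <;> simp
    · -- non-carry: A bumps the head; B's run length is 0
      have hbne : ¬ (c == '~') = true := by simpa using hne
      have hc : c ∈ pvTable := by
        have h := hP
        simp only [List.dropWhile_cons, hbne] at h
        simpa using h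
      obtain ⟨idx, hidx⟩ := Option.isSome_iff_exists.mp
        ((PySem.List.index?_isSome_iff pvTable c).mpr hc)
      have hne90 : idx ≠ 90 := fun h => hne ((pvTable_last_iff c hc).mp (h ▸ hidx))
      obtain ⟨hk, -, -⟩ := PySem.List.getElem_of_index?_eq_some hidx
      have hlen : pvTable.length = 91 := by decide
      have hif : ¬ (idx + 1 = pvTable.length) := by omega
      have hlt : idx + 1 < pvTable.length := by omega
      have hget : PySem.List.pyGet? pvTable ((idx : Int) + 1) = some (pvTable[idx+1]'hlt) := by
        rw [show ((idx : Int) + 1) = ((idx + 1 : ℕ) : Int) from by push_cast; ring,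
          PySem.List.pyGet?_natCast]
        exact List.getElem?_eq_getElem hlt
      have htw : (c :: rest).takeWhile (fun c => c == '~') = [] := by
        simp [hbne]
      show incGuidA (c :: rest) = incGuidB (c :: rest)
      unfold incGuidA incGuidB
      rw [htw]
      simp only [List.length_nil, Nat.cast_zero]
      rw [show PySem.List.pyGet? (c :: rest) (0 : Int) = some c from by simp]
      rw [PySem.List.index?_eq_idxOf?] at hidx
      simp [hidx, hif, hget]

-- ===== VERDICT (by name: the statement is the Claim_ definition above) =====
theorem incGuid_py_spec : Claim_equal_incGuid_py := by
  intro guid _ hpre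
  unfold Spec_incGuid_py incGuid_py incGuid_py_alt
  rw [pvIncA_eq_incB guid.toList hpre]
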